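-- pv_equiv track=rewrite | github.com/jaykim-github/StudyingAlgorithm | python/countprice.py | solution
-- ===== SOURCE A (Python) =====
-- def solution(price, money, count):
--     answer = -1
--     p = 0
--     for i in range(1,count+1) :
--         p = p + (price*i)
--         if p > money :
--             answer = p-money
--         else :
--             answer = 0
--
--     return answer
-- ===== SOURCE B (Python) =====
-- def solution(price, money, count):
--     if count < 1:
--         return -1
--     total = price * count * (count + 1) // 2
--     return total - money if total > money else 0
-- ===== Notes on version B (the rewrite author's own statement) =====
-- stated objective: faster
-- what changed: Replaces the O(count) accumulation loop (whose answer only depends on the final cumulative sum) by the closed-form Gauss sum price*count*(count+1)//2 and a single comparison, returning -1 when count < 1 exactly as the empty loop does.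
import Mathlib
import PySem

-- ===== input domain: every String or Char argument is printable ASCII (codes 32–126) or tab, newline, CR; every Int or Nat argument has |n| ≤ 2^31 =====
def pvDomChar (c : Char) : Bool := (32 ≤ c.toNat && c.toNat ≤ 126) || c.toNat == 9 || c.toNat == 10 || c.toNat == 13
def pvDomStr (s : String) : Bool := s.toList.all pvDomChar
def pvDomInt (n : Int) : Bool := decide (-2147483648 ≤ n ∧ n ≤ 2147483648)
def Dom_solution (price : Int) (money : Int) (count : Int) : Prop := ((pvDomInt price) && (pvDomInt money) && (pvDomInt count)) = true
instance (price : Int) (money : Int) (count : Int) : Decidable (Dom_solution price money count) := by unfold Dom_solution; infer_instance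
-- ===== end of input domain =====

-- B replaces A's O(count) accumulation loop with the closed-form Gauss sum (O(1)); same value everywhere.


-- ===== PORT A =====
def solution (price : Int) (money : Int) (count : Int) : Int :=
  let s := (PySem.List.pyRange 1 (count + 1) 1).foldl
    (fun (st : Int × Int) i =>
      let p := st.2 + price * i
      (if p > money then p - money else 0, p))
    (-1, 0)
  s.1

-- ===== PORT B =====
def solution_alt (price : Int) (money : Int) (count : Int) : Int :=
  if count < 1 then -1
  else
    let total := PySem.Int.floordiv (price * count * (count + 1)) 2
    if total > money then total - money else 0

-- ===== PRECONDITION & SPEC =====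
def Spec_solution (price : Int) (money : Int) (count : Int) (out : Int) : Prop := out = solution_alt price money count
instance (price : Int) (money : Int) (count : Int) (out : Int) : Decidable (Spec_solution price money count out) := by unfold Spec_solution; infer_instance

-- ===== CLAIM (what is proved, stated in full; the proofs are below) =====
def Claim_equal_solution : Prop := ∀ (price : Int) (money : Int) (count : Int), Dom_solution price money count → Spec_solution price money count (solution price money count)

-- ===== LEMMAS AND PROOFS =====

-- the loop body of A's port
def pvStep (price money : Int) (st : Int × Int) (i : Int) : Int × Int :=
  let p := st.2 + price * i
  (if p > money then p - money else 0, p)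

-- closed-form running total after n iterations
def pvT (price : Int) (n : Nat) : Int := price * ((n * (n + 1) / 2 : Nat) : Int)

lemma pvT_succ (price : Int) (n : Nat) :
    pvT price (n + 1) = pvT price n + price * (1 + (n : Int)) := by
  unfold pvT
  have hd : (n + 1) * (n + 1 + 1) = n * (n + 1) + 2 * (n + 1) := by ring
  have h : ((n + 1) * (n + 1 + 1) / 2 : Nat) = (n * (n + 1) / 2 : Nat) + (n + 1) := by omega
  rw [h]
  push_cast
  ring

lemma pv_fold_eq (price money : Int) (n : Nat) (hn : 1 ≤ n) :
    (PySem.List.pyRange 1 (1 + (n : Int)) 1).foldl (pvStep price money) (-1, 0)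
      = (if pvT price n > money then pvT price n - money else 0, pvT price n) := by
  induction n with
  | zero => omega
  | succ k ih =>
    by_cases hk : 1 ≤ k
    · have hsplit : PySem.List.pyRange 1 (1 + ((k : Int) + 1)) 1
          = PySem.List.pyRange 1 (1 + (k : Int)) 1 ++ [1 + (k : Int)] := by
        have := PySem.List.pyRange_one_succ_right (a := 1) (b := 1 + (k : Int))
          (by omega)
        rw [← this]; ring_nf
      push_cast
      rw [hsplit, List.foldl_append, ih hk]
      simp only [List.foldl_cons, List.foldl_nil, pvStep, pvT_succ]
    · have hk0 : k = 0 := by omega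
      subst hk0
      rw [show ((1 : Int) + ((0 : Nat) + 1 : Nat)) = 1 + 1 from by norm_num,
         PySem.List.pyRange_one_singleton]
      norm_num [pvStep, pvT]

-- exact floor division by 2 of the even product count*(count+1)
lemma pv_total_eq (price count : Int) (hc : 1 ≤ count) :
    PySem.Int.floordiv (price * count * (count + 1)) 2 = pvT price count.toNat := by
  have hn : ((count.toNat : Int)) = count := Int.toNat_of_nonneg (by omega)
  obtain ⟨k, hk⟩ := Nat.even_mul_succ_self count.toNat
  have hdiv : count.toNat * (count.toNat + 1) / 2 = k := by omega
  have hcast : count * (count + 1) = 2 * (k : Int) := by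
    have h2 := congrArg (fun m : Nat => (m : Int)) hk
    push_cast at h2
    rw [hn] at h2
    linarith
  unfold pvT
  rw [hdiv]
  have hprod : price * count * (count + 1) = 2 * (price * (k : Int)) := by
    rw [mul_assoc, hcast]; ring
  rw [hprod]
  show Int.fdiv (2 * (price * (k : Int))) 2 = price * (k : Int)
  rw [Int.mul_fdiv_cancel_left _ (by norm_num)]

-- ===== VERDICT (by name: the statement is the Claim_ definition above) =====
theorem solution_spec : Claim_equal_solution := by
  intro price money count _
  unfold Spec_solution solution solution_alt
  by_cases hc : count < 1
  · have : PySem.List.pyRange 1 (count + 1) 1 = [] :=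
      PySem.List.pyRange_one_eq_nil (by omega)
    simp [this, hc]
  · have hc1 : 1 ≤ count := by omega
    have hn : ((count.toNat : Int)) = count := Int.toNat_of_nonneg (by omega)
    have hfold := pv_fold_eq price money count.toNat (by omega)
    rw [hn, show (1 : Int) + count = count + 1 from by ring] at hfold
    have hstep : (fun (st : Int × Int) i =>
        let p := st.2 + price * i
        ((if p > money then p - money else 0), p)) = pvStep price money := rfl
    rw [hstep, hfold, if_neg hc]
    simp only [pv_total_eq price count hc1]
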